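-- pv_equiv track=rewrite | github.com/smithhmark/python_code_puzzles | hackerrank/equal/equal.py | _build_table_down
-- ===== SOURCE A (Python) =====
-- def rounds_between(n1, n2, rs=[1,2,5]):
--     diff = abs(n1-n2)
--     rounds = 0
--     if diff > 0:
--         for rr in reversed(rs):
--             d, m = divmod(diff, rr)
--             rounds += d
--             diff = m
--         if rounds == 0:
--             return -1
--         else:
--             return rounds
--     else:
--         return 0
--
-- def _build_table_down(ns, rs):
--     mnvl = min(ns)
--     c_0 = 0
--     c_mn = 0
--     costs = [0] * 5
--     for ii in range(len(ns)):
--         for fudge, cost in enumerate(costs):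
--             if cost is not None:
--                 rnds = rounds_between(mnvl, fudge+ns[ii], rs)
--                 if rnds == -1:
--                     costs[fudge] = None
--                 else:
--                     costs[fudge] = cost + rnds
--     return costs
-- ===== SOURCE B (Python) =====
-- def rounds_between(n1, n2, rs=[1,2,5]):
--     diff = abs(n1-n2)
--     rounds = 0
--     if diff > 0:
--         for rr in reversed(rs):
--             d, m = divmod(diff, rr)
--             rounds += d
--             diff = m
--         if rounds == 0:
--             return -1
--         else:
--             return rounds
--     else:
--         return 0
--
-- def _build_table_down(ns, rs):
--     mnvl = min(ns)
--
--     def column(fudge):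
--         total = 0
--         for n in ns:
--             rnds = rounds_between(mnvl, fudge + n, rs)
--             if rnds == -1:
--                 return None
--             total += rnds
--         return total
--
--     return [column(fudge) for fudge in range(5)]
-- ===== Notes on version B (the rewrite author's own statement) =====
-- stated objective: simpler
-- what changed: Swapped the loop nesting: one pass over ns per fudge column with a running total and an early return None on the first -1, instead of updating all five cost slots (with None checks) on every element; the 5-list is built once by a comprehension.
import Mathlib
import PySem

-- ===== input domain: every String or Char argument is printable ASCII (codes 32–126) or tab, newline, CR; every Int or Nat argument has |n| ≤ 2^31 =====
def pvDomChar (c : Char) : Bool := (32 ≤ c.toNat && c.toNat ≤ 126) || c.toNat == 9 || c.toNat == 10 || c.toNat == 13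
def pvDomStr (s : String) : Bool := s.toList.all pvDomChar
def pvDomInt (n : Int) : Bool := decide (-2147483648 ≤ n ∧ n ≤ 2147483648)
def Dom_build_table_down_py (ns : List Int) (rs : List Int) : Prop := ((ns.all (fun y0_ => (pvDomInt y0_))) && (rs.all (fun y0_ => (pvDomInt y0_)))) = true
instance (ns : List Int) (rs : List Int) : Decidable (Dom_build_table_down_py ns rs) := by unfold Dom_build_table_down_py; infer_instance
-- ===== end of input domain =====

-- B swaps the loop nesting of A: one pass over ns per fudge column (running total, early None
-- on the first -1) instead of updating all five cost slots on every element — objective: simpler.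

-- ===== PORT A =====
-- shared helper: both Pythons contain the identical rounds_between(n1, n2, rs).
-- divmod(diff, rr) raises on rr = 0 (PySem.Int.divmod? = none there); such inputs are outside Pre_,
-- so the .getD default is never reached on admitted inputs.
def roundsBetween (n1 n2 : Int) (rs : List Int) : Int :=
  let diff := |n1 - n2|
  if diff > 0 then
    let st := rs.reverse.foldl
      (fun (st : Int × Int) rr =>
        let dm := (PySem.Int.divmod? st.2 rr).getD (0, st.2)
        (st.1 + dm.1, dm.2)) ((0 : Int), diff)
    if st.1 = 0 then -1 else st.1
  else 0

-- min(ns) raises ValueError on ns = []; excluded by Pre_, so the .getD default is never reached.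
def build_table_down_py (ns : List Int) (rs : List Int) : List (Option Int) :=
  let mnvl := (PySem.List.min? ns (fun x => x)).getD 0
  (PySem.List.pyRange 0 (ns.length : Int) 1).foldl
    (fun costs ii =>
      costs.mapIdx (fun fudge cost =>
        match cost with
        | none => none
        | some c =>
          let rnds := roundsBetween mnvl ((fudge : Int) + PySem.List.pyGetD ns ii 0) rs
          if rnds = -1 then none else some (c + rnds)))
    (List.replicate 5 (some 0))

-- ===== PORT B =====
-- inner function `column(fudge)` of Source B: early `return None` at the first -1.
def bColumn (mnvl : Int) (rs : List Int) (fudge : Int) : List Int → Int → Option Int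
  | [], total => some total
  | n :: rest, total =>
    let rnds := roundsBetween mnvl (fudge + n) rs
    if rnds = -1 then none else bColumn mnvl rs fudge rest (total + rnds)

def build_table_down_py_alt (ns : List Int) (rs : List Int) : List (Option Int) :=
  let mnvl := (PySem.List.min? ns (fun x => x)).getD 0
  (PySem.List.pyRange 0 5 1).map (fun fudge => bColumn mnvl rs fudge ns 0)

-- ===== PRECONDITION & SPEC =====
-- A raises on ns = [] (ValueError from min) and, whenever ns ≠ [], on 0 ∈ rs
-- (ZeroDivisionError from divmod, always reached via fudge = 1); Pre_ excludes exactly those.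
def Pre_build_table_down_py (ns : List Int) (rs : List Int) : Prop :=
  ns ≠ [] ∧ (0 : Int) ∉ rs
instance (ns : List Int) (rs : List Int) : Decidable (Pre_build_table_down_py ns rs) := by
  unfold Pre_build_table_down_py; infer_instance

def pvWitness_build_table_down_py : List Int × List Int := ([1, 2, 5], [1, 2, 5])

def Spec_build_table_down_py (ns : List Int) (rs : List Int) (out : List (Option Int)) : Prop := out = build_table_down_py_alt ns rs
instance (ns : List Int) (rs : List Int) (out : List (Option Int)) : Decidable (Spec_build_table_down_py ns rs out) := by unfold Spec_build_table_down_py; infer_instance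

-- ===== CLAIM (what is proved, stated in full; the proofs are below) =====
def Claim_equal_build_table_down_py : Prop := ∀ (ns : List Int) (rs : List Int), Dom_build_table_down_py ns rs → Pre_build_table_down_py ns rs → Spec_build_table_down_py ns rs (build_table_down_py ns rs)

-- ===== LEMMAS AND PROOFS =====

-- A's per-slot update, abstracted: one element n applied to slot `fudge` holding `cost`.
def stepA (mnvl : Int) (rs : List Int) (fudge : Int) (cost : Option Int) (n : Int) : Option Int :=
  match cost with
  | none => none
  | some c =>
    let rnds := roundsBetween mnvl (fudge + n) rs
    if rnds = -1 then none else some (c + rnds)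

-- interchange of the two loops: folding "mapIdx each slot" over the elements
-- equals mapIdx-ing, per slot, the fold over the elements.
theorem foldl_mapIdx_comm {α β : Type} (g : Nat → β → α → β) :
    ∀ (ns : List α) (cs : List β),
      ns.foldl (fun cs n => cs.mapIdx (fun i c => g i c n)) cs
        = cs.mapIdx (fun i c => ns.foldl (g i) c) := by
  intro ns
  induction ns with
  | nil =>
    intro cs
    induction cs with
    | nil => rfl
    | cons c t ihc => simpa using ihc
  | cons n t ih =>
    intro cs
    simp only [List.foldl_cons, ih, List.mapIdx_mapIdx]
    rfl

theorem stepA_none_absorb (mnvl : Int) (rs : List Int) (fudge : Int) :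
    ∀ ns : List Int, ns.foldl (stepA mnvl rs fudge) none = none := by
  intro ns
  induction ns with
  | nil => rfl
  | cons n t ih => simpa [stepA] using ih

theorem bColumn_eq_foldl (mnvl : Int) (rs : List Int) (fudge : Int) :
    ∀ (ns : List Int) (total : Int),
      bColumn mnvl rs fudge ns total = ns.foldl (stepA mnvl rs fudge) (some total) := by
  intro ns
  induction ns with
  | nil => intro total; rfl
  | cons n t ih =>
    intro total
    by_cases h : roundsBetween mnvl (fudge + n) rs = -1
    · simp [bColumn, stepA, h, stepA_none_absorb]
    · simp [bColumn, stepA, h, ih]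

theorem main_aux (ns rs : List Int) (mnvl : Int) :
    (PySem.List.pyRange 0 (ns.length : Int) 1).foldl
      (fun costs ii =>
        costs.mapIdx (fun fudge cost =>
          match cost with
          | none => none
          | some c =>
            let rnds := roundsBetween mnvl ((fudge : Int) + PySem.List.pyGetD ns ii 0) rs
            if rnds = -1 then none else some (c + rnds)))
      (List.replicate 5 (some 0))
    = (PySem.List.pyRange 0 5 1).map (fun fudge => bColumn mnvl rs fudge ns 0) := by
  have h1 :
      (PySem.List.pyRange 0 (ns.length : Int) 1).foldl
        (fun costs ii =>
          costs.mapIdx (fun fudge cost =>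
            match cost with
            | none => none
            | some c =>
              let rnds := roundsBetween mnvl ((fudge : Int) + PySem.List.pyGetD ns ii 0) rs
              if rnds = -1 then none else some (c + rnds)))
        (List.replicate 5 (some 0))
      = ns.foldl
        (fun costs n => costs.mapIdx (fun fudge cost =>
          match cost with
          | none => none
          | some c =>
            let rnds := roundsBetween mnvl ((fudge : Int) + n) rs
            if rnds = -1 then none else some (c + rnds)))
        (List.replicate 5 (some 0)) :=
    PySem.List.foldl_pyRange_zero_pyGetD' ns 0
      (fun costs n => costs.mapIdx (fun fudge cost =>
        match cost with
        | none => none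
        | some c =>
          let rnds := roundsBetween mnvl ((fudge : Int) + n) rs
          if rnds = -1 then none else some (c + rnds)))
      (List.replicate 5 (some 0))
  rw [h1]
  rw [show (fun (costs : List (Option Int)) (n : Int) => costs.mapIdx (fun fudge cost =>
        match cost with
        | none => none
        | some c =>
          let rnds := roundsBetween mnvl ((fudge : Int) + n) rs
          if rnds = -1 then none else some (c + rnds)))
      = (fun costs n => costs.mapIdx (fun i c => stepA mnvl rs (i : Int) c n)) from by
        funext costs n
        rfl]
  rw [foldl_mapIdx_comm (fun i c n => stepA mnvl rs (i : Int) c n)]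
  rw [show PySem.List.pyRange 0 5 1 = [0, 1, 2, 3, 4] from by decide]
  simp [List.replicate, List.mapIdx_cons, bColumn_eq_foldl]

-- ===== VERDICT (by name: the statement is the Claim_ definition above) =====
theorem build_table_down_py_spec : Claim_equal_build_table_down_py := by
  intro ns rs _ _
  show build_table_down_py ns rs = build_table_down_py_alt ns rs
  exact main_aux ns rs ((PySem.List.min? ns (fun x => x)).getD 0)
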